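-- pv_equiv track=rewrite | github.com/georgesleen/gs-kicad-lib | scripts/check-symbol-fields.py | _block_depth_delta
-- ===== SOURCE A (Python) =====
-- def _block_depth_delta(line: str) -> int:
--     depth = 0
--     in_string = False
--     escaped = False
--     for char in line:
--         if escaped:
--             escaped = False
--             continue
--         if char == "\\":
--             escaped = True
--             continue
--         if char == '"':
--             in_string = not in_string
--             continue
--         if in_string:
--             continue
--         if char == "(":
--             depth += 1
--         elif char == ")":
--             depth -= 1
--     return depth
-- ===== SOURCE B (Python) =====
-- def _clean(line):
--     # strip escape pairs and string literals; keep everything else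
--     out = []
--     i = 0
--     n = len(line)
--     while i < n:
--         c = line[i]
--         if c == "\\":
--             i += 2
--         elif c == '"':
--             i += 1
--             while i < n:
--                 if line[i] == "\\":
--                     i += 2
--                 elif line[i] == '"':
--                     i += 1
--                     break
--                 else:
--                     i += 1
--         else:
--             out.append(c)
--             i += 1
--     return out
--
--
-- def _block_depth_delta(line: str) -> int:
--     cleaned = _clean(line)
--     return cleaned.count("(") - cleaned.count(")")
-- ===== Notes on version B (the rewrite author's own statement) =====
-- stated objective: alternative
-- what changed: Replaces the fused per-character depth/in_string/escaped flag machine with a clean-then-count decomposition: a first pass deletes escape pairs and whole string literals (a dedicated inner loop consumes each string), then the paren delta is two counts over the cleaned characters.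
import Mathlib
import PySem

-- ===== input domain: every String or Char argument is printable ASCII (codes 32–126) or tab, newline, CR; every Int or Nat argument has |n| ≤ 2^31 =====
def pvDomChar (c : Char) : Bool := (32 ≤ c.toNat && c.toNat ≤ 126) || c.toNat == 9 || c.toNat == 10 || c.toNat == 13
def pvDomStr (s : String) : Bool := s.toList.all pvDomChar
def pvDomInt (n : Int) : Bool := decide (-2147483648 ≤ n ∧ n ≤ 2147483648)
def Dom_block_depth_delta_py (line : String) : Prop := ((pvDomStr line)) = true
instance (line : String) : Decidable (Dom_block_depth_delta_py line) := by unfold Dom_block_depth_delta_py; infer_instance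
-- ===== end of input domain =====

-- B replaces A's fused depth/in_string/escaped flag machine by a clean-then-count decomposition (alternative, same cost).

-- ===== PORT A =====
-- A's for-loop over the characters with state (depth, in_string, escaped)
def aLoop : List Char → Int → Bool → Bool → Int
  | [], depth, _, _ => depth
  | c :: rest, depth, instr, escaped =>
    if escaped then aLoop rest depth instr false
    else if c = '\\' then aLoop rest depth instr true
    else if c = '"' then aLoop rest depth (!instr) false
    else if instr then aLoop rest depth instr false
    else if c = '(' then aLoop rest (depth + 1) instr false
    else if c = ')' then aLoop rest (depth - 1) instr false
    else aLoop rest depth instr false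

def block_depth_delta_py (line : String) : Int := aLoop line.toList 0 false false

-- ===== PORT B =====
-- B's _clean: the outer while loop (outside any string literal) and its inner
-- while loop consuming a string literal, as mutual recursion on the remaining characters
mutual
def cleanOutside : List Char → List Char
  | [] => []
  | '\\' :: [] => []
  | '\\' :: _ :: rest => cleanOutside rest
  | '"' :: rest => cleanInside rest
  | c :: rest => c :: cleanOutside rest
def cleanInside : List Char → List Char
  | [] => []
  | '\\' :: [] => []
  | '\\' :: _ :: rest => cleanInside rest
  | '"' :: rest => cleanOutside rest
  | _ :: rest => cleanInside rest
end

def block_depth_delta_py_alt (line : String) : Int :=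
  let cleaned := cleanOutside line.toList
  (PySem.List.count cleaned '(' : Int) - (PySem.List.count cleaned ')' : Int)

-- ===== PRECONDITION & SPEC =====
def Spec_block_depth_delta_py (line : String) (out : Int) : Prop := out = block_depth_delta_py_alt line
instance (line : String) (out : Int) : Decidable (Spec_block_depth_delta_py line out) := by unfold Spec_block_depth_delta_py; infer_instance

-- ===== CLAIM (what is proved, stated in full; the proofs are below) =====
def Claim_equal_block_depth_delta_py : Prop := ∀ (line : String), Dom_block_depth_delta_py line → Spec_block_depth_delta_py line (block_depth_delta_py line)

-- ===== LEMMAS AND PROOFS =====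

-- the paren delta of a cleaned character list
def delta (l : List Char) : Int := (PySem.List.count l '(' : Int) - (PySem.List.count l ')' : Int)

theorem delta_nil : delta [] = 0 := by decide

theorem delta_cons (c : Char) (l : List Char) :
    delta (c :: l) = (if c = '(' then 1 else if c = ')' then -1 else 0) + delta l := by
  simp only [delta, PySem.List.count, List.count_cons]
  by_cases h1 : c = '('
  · subst h1; simp; ring
  · by_cases h2 : c = ')'
    · subst h2; simp [h1]; ring
    · simp [h1, h2, beq_iff_eq]

-- main invariant: A's loop from a non-escaped state equals depth + delta of the corresponding clean pass
theorem aLoop_clean_aux : ∀ n l, List.length l ≤ n → ∀ depth : Int,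
    (aLoop l depth false false = depth + delta (cleanOutside l)) ∧
    (aLoop l depth true false = depth + delta (cleanInside l)) := by
  intro n
  induction n with
  | zero =>
    intro l hl depth
    have : l = [] := List.length_eq_zero_iff.mp (Nat.le_zero.mp hl)
    subst this
    simp [aLoop, cleanOutside, cleanInside, delta_nil]
  | succ n ih =>
    intro l hl depth
    match l with
    | [] => simp [aLoop, cleanOutside, cleanInside, delta_nil]
    | c :: rest =>
      by_cases hb : c = '\\'
      · subst hb
        match rest with
        | [] => constructor <;> simp [aLoop, cleanOutside, cleanInside, delta_nil]
        | d :: rest' =>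
          have hlen : List.length rest' ≤ n := by
            simp at hl; omega
          have ihr := ih rest' hlen depth
          constructor
          · simpa [aLoop, cleanOutside] using ihr.1
          · simpa [aLoop, cleanInside] using ihr.2
      · have hlen : List.length rest ≤ n := by simp at hl; omega
        have ihr := fun d => ih rest hlen d
        by_cases hq : c = '"'
        · subst hq
          constructor <;> simp [aLoop, cleanOutside, cleanInside, (ihr depth).1, (ihr depth).2]
        · constructor
          · by_cases hp : c = '('
            · subst hp
              have hco : cleanOutside ('(' :: rest) = '(' :: cleanOutside rest := by
                simp [cleanOutside]
              rw [aLoop, hco, delta_cons]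
              simp [(ihr (depth + 1)).1]
              ring
            · by_cases hr : c = ')'
              · subst hr
                have hco : cleanOutside (')' :: rest) = ')' :: cleanOutside rest := by
                  simp [cleanOutside]
                rw [aLoop, hco, delta_cons]
                simp [(ihr (depth - 1)).1]
                ring
              · have hco : cleanOutside (c :: rest) = c :: cleanOutside rest := by
                  rw [cleanOutside.eq_def]
                  split <;> simp_all
                rw [aLoop, hco, delta_cons]
                simp [hb, hq, hp, hr, (ihr depth).1]
          · have hci : cleanInside (c :: rest) = cleanInside rest := by
              rw [cleanInside.eq_def]
              split <;> simp_all
            rw [aLoop, hci]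
            simp [hb, hq, (ihr depth).2]

-- ===== VERDICT (by name: the statement is the Claim_ definition above) =====
theorem block_depth_delta_py_spec : Claim_equal_block_depth_delta_py := by
  intro line _
  unfold Spec_block_depth_delta_py block_depth_delta_py block_depth_delta_py_alt
  have h := (aLoop_clean_aux (List.length line.toList) line.toList le_rfl 0).1
  simpa [delta] using h
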